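-- pv_equiv track=rewrite | github.com/dudamarlena/pyc_source | pycfiles/DarTui-1.1.0-py2.6/formatters.py | format_time_difference
-- ===== SOURCE A (Python) =====
-- def format_time_difference(t_diff, total_unit_count=2):
--     units = ('year', 'month', 'day', 'hour', 'minute', 'second')
--     unit_in_seconds = (31536000, 2635200, 86400, 3600, 60, 1)
--     current_unit_count = 0
--     formatted_diff_list = []
--     t_diff_reduced = int(t_diff)
--     i = 0
--     while current_unit_count < total_unit_count and i < len(units):
--         cur_unit = units[i]
--         cur_unit_in_seconds = unit_in_seconds[i]
--         if t_diff_reduced >= cur_unit_in_seconds: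
--             unit_amt = int(t_diff_reduced / cur_unit_in_seconds)
--             unit_str = ('{0} {1}').format(unit_amt, cur_unit)
--             if unit_amt > 1:
--                 unit_str += 's'
--             formatted_diff_list.append(unit_str)
--             t_diff_reduced -= unit_amt * cur_unit_in_seconds
--             current_unit_count += 1
--         i += 1
--
--     t_str = (', ').join(formatted_diff_list)
--     return t_str
-- ===== SOURCE B (Python) =====
-- def format_time_difference(t_diff, total_unit_count=2):
--     units = (('year', 31536000), ('month', 2635200), ('day', 86400),
--              ('hour', 3600), ('minute', 60), ('second', 1))
--     # Pass 1: full breakdown, one (name, amount) entry per unit.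
--     breakdown = []
--     remaining = int(t_diff)
--     for name, secs in units:
--         amt = int(remaining / secs)
--         breakdown.append((name, amt))
--         remaining -= amt * secs
--     # Pass 2: select up to total_unit_count entries with a positive amount.
--     parts = []
--     count = 0
--     for name, amt in breakdown:
--         if count >= total_unit_count:
--             break
--         if amt >= 1:
--             parts.append('{0} {1}'.format(amt, name) + ('s' if amt > 1 else ''))
--             count += 1
--     return ', '.join(parts)
-- ===== Notes on version B (the rewrite author's own statement) =====
-- stated objective: alternative
-- what changed: A's single while loop that divides only while the unit counter allows and the remainder exceeds the unit is split into two separate passes: an unconditional full breakdown of all six units, then a counter-limited selection of the positive amounts.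
import Mathlib
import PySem

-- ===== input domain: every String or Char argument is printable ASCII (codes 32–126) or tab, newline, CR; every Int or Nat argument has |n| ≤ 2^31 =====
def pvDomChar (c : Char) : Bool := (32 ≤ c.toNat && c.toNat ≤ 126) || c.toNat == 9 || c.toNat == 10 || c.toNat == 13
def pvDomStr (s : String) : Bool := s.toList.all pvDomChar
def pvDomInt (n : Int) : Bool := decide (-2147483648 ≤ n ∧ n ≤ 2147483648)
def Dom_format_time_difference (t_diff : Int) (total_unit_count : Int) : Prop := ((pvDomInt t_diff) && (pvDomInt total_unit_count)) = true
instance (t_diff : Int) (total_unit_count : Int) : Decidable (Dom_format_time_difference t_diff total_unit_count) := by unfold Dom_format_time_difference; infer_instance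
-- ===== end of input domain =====

-- B replaces A's single guarded while loop (divide only while the counter allows and the
-- remainder is large enough) by two passes: a full unconditional breakdown of every unit,
-- then a counter-limited selection of the positive amounts (objective: alternative decomposition).

-- ===== PORT A =====
-- A's while loop: state (current_unit_count, t_diff_reduced), iterating i over the zipped
-- units/unit_in_seconds tuples; int(a / b) is PySem.Int.truncdiv (exact here: |t_diff| ≤ 2^31 < 2^53).
def fmtA_loop (total : Int) (c : Int) (r : Int) : List (String × Int) → List String
  | [] => []
  | (name, u) :: us =>
      if c < total then
        if r ≥ u then
          let amt := PySem.Int.truncdiv r u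
          let s0 := PySem.Int.toStr amt ++ " " ++ name
          let s1 := if amt > 1 then s0 ++ "s" else s0
          s1 :: fmtA_loop total (c + 1) (r - amt * u) us
        else
          fmtA_loop total c r us
      else []

def format_time_difference (t_diff : Int) (total_unit_count : Int) : String :=
  PySem.Str.join ", " (fmtA_loop total_unit_count 0 t_diff
    [("year", 31536000), ("month", 2635200), ("day", 86400),
     ("hour", 3600), ("minute", 60), ("second", 1)])

-- ===== PORT B =====
-- Pass 1 of Source B: full breakdown, one (name, amount) entry per unit.
def fmtB_breakdown (r : Int) : List (String × Int) → List (String × Int)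
  | [] => []
  | (name, u) :: us =>
      let amt := PySem.Int.truncdiv r u
      (name, amt) :: fmtB_breakdown (r - amt * u) us

-- Pass 2 of Source B: counter-limited selection of the entries with amount ≥ 1.
def fmtB_select (total : Int) (c : Int) : List (String × Int) → List String
  | [] => []
  | (name, amt) :: rest =>
      if c ≥ total then []
      else if amt ≥ 1 then
        (PySem.Int.toStr amt ++ " " ++ name ++ (if amt > 1 then "s" else ""))
          :: fmtB_select total (c + 1) rest
      else fmtB_select total c rest

def format_time_difference_alt (t_diff : Int) (total_unit_count : Int) : String :=
  PySem.Str.join ", " (fmtB_select total_unit_count 0 (fmtB_breakdown t_diff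
    [("year", 31536000), ("month", 2635200), ("day", 86400),
     ("hour", 3600), ("minute", 60), ("second", 1)]))

-- ===== PRECONDITION & SPEC =====
def Spec_format_time_difference (t_diff : Int) (total_unit_count : Int) (out : String) : Prop := out = format_time_difference_alt t_diff total_unit_count
instance (t_diff : Int) (total_unit_count : Int) (out : String) : Decidable (Spec_format_time_difference t_diff total_unit_count out) := by unfold Spec_format_time_difference; infer_instance

-- ===== CLAIM (what is proved, stated in full; the proofs are below) =====
def Claim_equal_format_time_difference : Prop := ∀ (t_diff : Int) (total_unit_count : Int), Dom_format_time_difference t_diff total_unit_count → Spec_format_time_difference t_diff total_unit_count (format_time_difference t_diff total_unit_count)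

-- ===== LEMMAS AND PROOFS =====

-- Truncating division/remainder of a nonpositive number by a positive one are nonpositive.
theorem tdiv_tmod_nonpos (r u : Int) (h1 : 0 < u) (hr : r ≤ 0) :
    r.tdiv u ≤ 0 ∧ r - r.tdiv u * u ≤ 0 := by
  have key := Int.tdiv_mul_add_tmod r u
  have hd : r.tdiv u ≤ 0 := by
    have := Int.tdiv_nonneg (a := -r) (b := u) (by omega) (by omega)
    rw [Int.neg_tdiv] at this; omega
  have hm : r.tmod u ≤ 0 := by
    have := Int.tmod_nonneg (b := u) (a := -r) (by omega)
    rw [Int.neg_tmod] at this; omega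
  omega

-- With a nonpositive remainder, A's loop never fires (every unit is ≥ 1).
theorem fmtA_loop_nonpos (total c r : Int) (us : List (String × Int))
    (hu : ∀ p ∈ us, 1 ≤ p.2) (hr : r ≤ 0) : fmtA_loop total c r us = [] := by
  induction us with
  | nil => rfl
  | cons p us ih =>
      obtain ⟨name, u⟩ := p
      have h1 : (1 : Int) ≤ u := hu _ List.mem_cons_self
      have hlt : ¬ r ≥ u := by omega
      simp only [fmtA_loop, hlt, if_false]
      split
      · exact ih (fun q hq => hu _ (List.mem_cons_of_mem _ hq))
      · rfl

-- With a nonpositive remainder, every breakdown amount is ≤ 0, so the selection is empty.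
theorem fmtB_select_nonpos (total c r : Int) (us : List (String × Int))
    (hu : ∀ p ∈ us, 1 ≤ p.2) (hr : r ≤ 0) :
    fmtB_select total c (fmtB_breakdown r us) = [] := by
  induction us generalizing r with
  | nil => rfl
  | cons p us ih =>
      obtain ⟨name, u⟩ := p
      have h1 : (1 : Int) ≤ u := hu _ List.mem_cons_self
      obtain ⟨hd, hm⟩ := tdiv_tmod_nonpos r u (by omega) hr
      simp only [fmtB_breakdown, fmtB_select, PySem.Int.truncdiv]
      split
      · rfl
      · have hne : ¬ r.tdiv u ≥ 1 := by omega
        simp only [hne, if_false]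
        exact ih _ (fun q hq => hu _ (List.mem_cons_of_mem _ hq)) hm

-- Main invariant: A's guarded loop equals B's select-over-breakdown, for any unit list
-- of positive sizes, any remainder and any counter value.
theorem fmt_loop_eq (us : List (String × Int)) (hu : ∀ p ∈ us, 1 ≤ p.2)
    (total c r : Int) :
    fmtA_loop total c r us = fmtB_select total c (fmtB_breakdown r us) := by
  induction us generalizing c r with
  | nil => rfl
  | cons p us ih =>
      obtain ⟨name, u⟩ := p
      have h1 : (1 : Int) ≤ u := hu _ List.mem_cons_self
      have hu' : ∀ q ∈ us, 1 ≤ q.2 := fun q hq => hu _ (List.mem_cons_of_mem _ hq)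
      by_cases hc : c < total
      · have hnc : ¬ c ≥ total := by omega
        simp only [fmtA_loop, fmtB_breakdown, fmtB_select, hc, hnc, if_true, if_false]
        by_cases hru : r ≥ u
        · have he : PySem.Int.truncdiv r u = r / u := by
            simp [PySem.Int.truncdiv, Int.tdiv_eq_ediv_of_nonneg (by omega : (0:Int) ≤ r)]
          have hamt : 1 ≤ PySem.Int.truncdiv r u := by
            rw [he]
            exact (Int.le_ediv_iff_mul_le (by omega)).mpr (by omega)
          simp only [hru, if_true, ge_iff_le, hamt]
          rw [ih hu']
          by_cases h2 : PySem.Int.truncdiv r u > 1 <;> simp [h2]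
        · simp only [hru, if_false]
          by_cases hr0 : 0 ≤ r
          · -- 0 ≤ r < u: the amount is 0 and the remainder is unchanged on the B side too
            have hz : PySem.Int.truncdiv r u = 0 := by
              simpa [PySem.Int.truncdiv] using Int.tdiv_eq_zero_of_lt hr0 (by omega)
            have hne : ¬ (0 : Int) ≥ 1 := by omega
            simp only [hz, hne, if_false, zero_mul, sub_zero]
            exact ih hu' c r
          · -- negative remainder: neither side produces anything from here on
            have hr : r ≤ 0 := by omega
            obtain ⟨hd, hm⟩ := tdiv_tmod_nonpos r u (by omega) hr
            have hne : ¬ PySem.Int.truncdiv r u ≥ 1 := by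
              simp only [PySem.Int.truncdiv]; omega
            simp only [hne, if_false]
            rw [fmtA_loop_nonpos total c r us hu' hr,
                fmtB_select_nonpos total c _ us hu' (by simpa [PySem.Int.truncdiv] using hm)]
      · have hgc : c ≥ total := by omega
        simp only [fmtA_loop, fmtB_breakdown, fmtB_select, hc, hgc, if_false, if_true]

-- ===== VERDICT (by name: the statement is the Claim_ definition above) =====
theorem format_time_difference_spec : Claim_equal_format_time_difference := by
  intro t_diff total_unit_count _
  unfold Spec_format_time_difference format_time_difference format_time_difference_alt
  rw [fmt_loop_eq _ (by decide)]
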